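-- pv_equiv track=rewrite | github.com/jinsoo96/xgen-harness-executor | xgen_harness/providers/__init__.py | get_provider_models
-- ===== SOURCE A (Python) =====
-- PROVIDER_DEFAULT_MODEL: dict[str, str] = {
--     "anthropic": "claude-sonnet-4-20250514",
--     "openai": "gpt-4o-mini",
--     "google": "gemini-2.0-flash",
-- }
--
-- PROVIDER_MODELS: dict[str, list[str]] = {
--     "anthropic": [
--         "claude-sonnet-4-20250514",
--         "claude-opus-4-20250514",
--         "claude-haiku-4-5-20251001",
--     ],
--     "openai": [
--         "gpt-4o-mini",
--         "gpt-4o",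
--         "o3-mini",
--     ],
--     "google": [
--         "gemini-2.0-flash",
--         "gemini-2.5-pro",
--         "gemini-2.5-flash",
--     ],
--     "bedrock": [],
--     "vllm": [],
-- }
--
-- def get_provider_models(provider: str) -> list[str]:
--     """프로바이더별 모델 목록 (기본 모델 포함, 중복 제거).
--
--     UI 가 이 목록을 드롭다운으로 렌더. 새 provider 추가 시
--     PROVIDER_MODELS 에 append → 자동 반영.
--     """
--     models: list[str] = []
--     default = PROVIDER_DEFAULT_MODEL.get(provider.lower(), "")
--     if default:
--         models.append(default)
--     for m in PROVIDER_MODELS.get(provider.lower(), []):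
--         if m and m not in models:
--             models.append(m)
--     return models
-- ===== SOURCE B (Python) =====
-- PROVIDER_DEFAULT_MODEL: dict[str, str] = {
--     "anthropic": "claude-sonnet-4-20250514",
--     "openai": "gpt-4o-mini",
--     "google": "gemini-2.0-flash",
-- }
--
-- PROVIDER_MODELS: dict[str, list[str]] = {
--     "anthropic": [
--         "claude-sonnet-4-20250514",
--         "claude-opus-4-20250514",
--         "claude-haiku-4-5-20251001",
--     ],
--     "openai": [
--         "gpt-4o-mini",
--         "gpt-4o",
--         "o3-mini",
--     ],
--     "google": [
--         "gemini-2.0-flash",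
--         "gemini-2.5-pro",
--         "gemini-2.5-flash",
--     ],
--     "bedrock": [],
--     "vllm": [],
-- }
--
-- # Precomputed once at import time: for every provider key, the default model followed
-- # by its model list, deduplicated (first occurrence wins) and with empty strings dropped.
-- # (Every key of PROVIDER_DEFAULT_MODEL also appears in PROVIDER_MODELS, so iterating
-- # PROVIDER_MODELS covers all providers.)
-- _MERGED_MODELS: dict[str, list[str]] = {
--     key: [m for m in dict.fromkeys([PROVIDER_DEFAULT_MODEL.get(key, "")] + models) if m]
--     for key, models in PROVIDER_MODELS.items()
-- }
--
-- def get_provider_models(provider: str) -> list[str]: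
--     return list(_MERGED_MODELS.get(provider.lower(), []))
-- ===== Notes on version B (the rewrite author's own statement) =====
-- stated objective: alternative
-- what changed: B precomputes, once at module load, a merged lookup table mapping each provider key to its deduplicated default-plus-models list, so each call is just a dictionary lookup (plus a defensive list copy) instead of A's per-call append-with-membership-scan loop.
import Mathlib
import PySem

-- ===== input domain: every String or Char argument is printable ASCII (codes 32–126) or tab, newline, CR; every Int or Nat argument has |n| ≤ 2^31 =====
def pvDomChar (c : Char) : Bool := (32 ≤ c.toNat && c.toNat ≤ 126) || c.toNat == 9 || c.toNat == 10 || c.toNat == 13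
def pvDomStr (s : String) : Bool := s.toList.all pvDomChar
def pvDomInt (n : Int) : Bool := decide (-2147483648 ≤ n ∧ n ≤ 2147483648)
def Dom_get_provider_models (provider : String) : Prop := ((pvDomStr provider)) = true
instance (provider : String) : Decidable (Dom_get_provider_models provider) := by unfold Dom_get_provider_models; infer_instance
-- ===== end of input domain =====

-- B precomputes a merged provider→deduped-model-list table once and answers each call by a
-- single dictionary lookup, replacing A's per-call append-with-membership-scan loop (objective: alternative).
-- ===== PORT A =====
-- module constants (shared context of both versions)
def PROVIDER_DEFAULT_MODEL : PySem.Dict String String :=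
  PySem.Dict.mk [("anthropic", "claude-sonnet-4-20250514"),
                 ("openai", "gpt-4o-mini"),
                 ("google", "gemini-2.0-flash")]

def PROVIDER_MODELS : PySem.Dict String (List String) :=
  PySem.Dict.mk [("anthropic", ["claude-sonnet-4-20250514", "claude-opus-4-20250514", "claude-haiku-4-5-20251001"]),
                 ("openai", ["gpt-4o-mini", "gpt-4o", "o3-mini"]),
                 ("google", ["gemini-2.0-flash", "gemini-2.5-pro", "gemini-2.5-flash"]),
                 ("bedrock", []),
                 ("vllm", [])]

def get_provider_models (provider : String) : List String :=
  let models : List String := []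
  let dflt := PROVIDER_DEFAULT_MODEL.getD (PySem.Str.lower provider) ""
  let models := if dflt ≠ "" then models ++ [dflt] else models
  (PROVIDER_MODELS.getD (PySem.Str.lower provider) []).foldl
    (fun acc m => if m ≠ "" ∧ m ∉ acc then acc ++ [m] else acc) models

-- ===== PORT B =====
-- _MERGED_MODELS: built once from the two constants (dict comprehension over PROVIDER_MODELS.items)
def MERGED_MODELS : PySem.Dict String (List String) :=
  PySem.Dict.mk (PROVIDER_MODELS.items.map (fun kv =>
    (kv.1, (PySem.List.dedup (PROVIDER_DEFAULT_MODEL.getD kv.1 "" :: kv.2)).filter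
             (fun m => m ≠ ""))))

def get_provider_models_alt (provider : String) : List String :=
  MERGED_MODELS.getD (PySem.Str.lower provider) []

-- ===== PRECONDITION & SPEC =====
def Spec_get_provider_models (provider : String) (out : List String) : Prop := out = get_provider_models_alt provider
instance (provider : String) (out : List String) : Decidable (Spec_get_provider_models provider out) := by unfold Spec_get_provider_models; infer_instance

-- ===== CLAIM (what is proved, stated in full; the proofs are below) =====
def Claim_equal_get_provider_models : Prop := ∀ (provider : String), Dom_get_provider_models provider → Spec_get_provider_models provider (get_provider_models provider)

-- ===== LEMMAS AND PROOFS =====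

-- both programs depend on the input only through provider.lower(); case on the finitely many
-- keys of the literal dicts; every other key hits both defaults ([] on each side).
theorem both_key (k : String) :
    ((if PROVIDER_DEFAULT_MODEL.getD k "" ≠ "" then ([] : List String) ++ [PROVIDER_DEFAULT_MODEL.getD k ""] else []) |>
      fun models => (PROVIDER_MODELS.getD k []).foldl
        (fun acc m => if m ≠ "" ∧ m ∉ acc then acc ++ [m] else acc) models)
    = MERGED_MODELS.getD k [] := by
  by_cases h1 : k = "anthropic"; · subst h1; decide
  by_cases h2 : k = "openai"; · subst h2; decide
  by_cases h3 : k = "google"; · subst h3; decide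
  by_cases h4 : k = "bedrock"; · subst h4; decide
  by_cases h5 : k = "vllm"; · subst h5; decide
  have hd : PROVIDER_DEFAULT_MODEL.getD k "" = "" := by
    simp [PROVIDER_DEFAULT_MODEL, PySem.Dict.getD_eq_get?_getD, PySem.Dict.get?,
      Ne.symm h1, Ne.symm h2, Ne.symm h3]
  have hm : PROVIDER_MODELS.getD k [] = [] := by
    simp [PROVIDER_MODELS, PySem.Dict.getD_eq_get?_getD, PySem.Dict.get?,
      Ne.symm h1, Ne.symm h2, Ne.symm h3, Ne.symm h4, Ne.symm h5]
  have hmerged : MERGED_MODELS.getD k [] = [] := by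
    simp [MERGED_MODELS, PROVIDER_MODELS, PROVIDER_DEFAULT_MODEL,
      PySem.Dict.getD_eq_get?_getD, PySem.Dict.get?,
      Ne.symm h1, Ne.symm h2, Ne.symm h3, Ne.symm h4, Ne.symm h5]
  simp [hd, hm, hmerged]

-- ===== VERDICT (by name: the statement is the Claim_ definition above) =====
theorem get_provider_models_spec : Claim_equal_get_provider_models := by
  intro provider _
  unfold Spec_get_provider_models get_provider_models get_provider_models_alt
  exact both_key (PySem.Str.lower provider)
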